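-- pv_equiv track=rewrite | github.com/Sheriffy4/recon | tools/test_domain_hierarchy.py | get_parent_domains
-- ===== SOURCE A (Python) =====
-- from typing import Dict, List, Any, Optional, Tuple
--
-- def get_parent_domains(domain: str) -> List[str]:
--     """Get list of parent domains for hierarchy traversal."""
--     if not domain:
--         return []
--
--     parts = domain.split('.')
--     parents = []
--
--     # Generate parent domains by removing subdomains
--     for i in range(len(parts)):
--         parent = '.'.join(parts[i:])
--         if parent != domain:
--             parents.append(parent)
--
--     return parents
-- ===== SOURCE B (Python) =====
-- def get_parent_domains(domain: str):
--     """Get list of parent domains for hierarchy traversal."""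
--     return [domain[i + 1:] for i, c in enumerate(domain) if c == '.']
-- ===== Notes on version B (the rewrite author's own statement) =====
-- stated objective: simpler
-- what changed: Instead of splitting into labels and re-joining every suffix (quadratic re-join work with an equality check against the whole domain), B scans the string once and emits the slice after each dot via a comprehension over enumerate.
import Mathlib
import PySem

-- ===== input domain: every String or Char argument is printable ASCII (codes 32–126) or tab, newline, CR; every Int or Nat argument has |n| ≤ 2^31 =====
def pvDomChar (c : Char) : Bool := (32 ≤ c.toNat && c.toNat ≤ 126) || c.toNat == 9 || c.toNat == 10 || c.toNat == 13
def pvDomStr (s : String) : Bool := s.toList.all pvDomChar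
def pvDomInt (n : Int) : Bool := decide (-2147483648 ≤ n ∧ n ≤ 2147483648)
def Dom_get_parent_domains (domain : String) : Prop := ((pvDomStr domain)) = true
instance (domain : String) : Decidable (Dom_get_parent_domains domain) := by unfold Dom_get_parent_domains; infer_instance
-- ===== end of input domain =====

-- B replaces A's split-into-labels / re-join-every-suffix scheme by a single scan emitting the slice after each dot (simpler).


-- ===== PORT A =====
-- A: if not domain: return []; parts = domain.split('.'); for i in range(len(parts)):
--    parent = '.'.join(parts[i:]); if parent != domain: parents.append(parent); return parents
def get_parent_domains (domain : String) : List String :=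
  if PySem.Str.len domain = 0 then []
  else
    let parts := PySem.Chars.splitOn domain.toList ['.']
    let parents := (PySem.List.pyRange 0 (parts.length : Int) 1).foldl
      (fun parents i =>
        let parent := PySem.Chars.join ['.'] (PySem.List.slice parts (some i) none)
        if parent ≠ domain.toList then parents ++ [parent] else parents) []
    parents.map String.ofList

-- ===== PORT B =====
-- B: [domain[i+1:] for i, c in enumerate(domain) if c == '.']
def get_parent_domains_alt (domain : String) : List String :=
  ((PySem.List.enumerate domain.toList 0).filter (fun p => p.2 == '.')).map
    (fun p => String.ofList (PySem.List.slice domain.toList (some (p.1 + 1)) none))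

-- ===== PRECONDITION & SPEC =====
def Spec_get_parent_domains (domain : String) (out : List String) : Prop := out = get_parent_domains_alt domain
instance (domain : String) (out : List String) : Decidable (Spec_get_parent_domains domain out) := by unfold Spec_get_parent_domains; infer_instance

-- ===== CLAIM (what is proved, stated in full; the proofs are below) =====
def Claim_equal_get_parent_domains : Prop := ∀ (domain : String), Dom_get_parent_domains domain → Spec_get_parent_domains domain (get_parent_domains domain)

-- ===== LEMMAS AND PROOFS =====

/-- Structural characterisation of `domain.split('.')`. -/
def splitDot : List Char → List (List Char)
  | [] => [[]]
  | c :: cs =>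
    if c = '.' then [] :: splitDot cs
    else match splitDot cs with
      | [] => [[c]]
      | h :: t => (c :: h) :: t

/-- Prepend `pre` onto the first piece (helper describing `splitOn.go`'s accumulator). -/
def consHead (pre : List Char) : List (List Char) → List (List Char)
  | [] => [pre]
  | h :: t => (pre ++ h) :: t

/-- Structural characterisation of B's result on the character list. -/
def bSpec : List Char → List (List Char)
  | [] => []
  | c :: cs => (if c = '.' then [cs] else []) ++ bSpec cs

lemma splitDot_ne_nil (cs : List Char) : splitDot cs ≠ [] := by
  cases cs with
  | nil => simp [splitDot]
  | cons c cs =>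
    simp only [splitDot]
    split
    · simp
    · split <;> simp

lemma splitDot_dot (cs : List Char) : splitDot ('.' :: cs) = [] :: splitDot cs := by
  simp [splitDot]

lemma splitDot_ndot {c : Char} (hc : ¬ c = '.') (cs h0 : List Char) (t0 : List (List Char))
    (hs : splitDot cs = h0 :: t0) : splitDot (c :: cs) = (c :: h0) :: t0 := by
  simp [splitDot, hc, hs]

lemma go_spec (fuel : ℕ) : ∀ (l cur : List Char) (accs : List (List Char)),
    l.length < fuel →
    PySem.Chars.splitOn.go ['.'] fuel l cur accs =
      accs.reverse ++ consHead cur.reverse (splitDot l) := by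
  induction fuel with
  | zero => intro l cur accs h; omega
  | succ fuel ih =>
    intro l cur accs h
    cases l with
    | nil => simp [PySem.Chars.splitOn.go, consHead, splitDot]
    | cons c rest =>
      rw [PySem.Chars.splitOn.go]
      by_cases hc : c = '.'
      · subst hc
        rw [if_pos (by simp [List.isPrefixOf])]
        rw [ih _ _ _ (by simp at h ⊢; omega)]
        rcases hs : splitDot rest with _ | ⟨h0, t0⟩
        · exact absurd hs (splitDot_ne_nil rest)
        · simp [splitDot, consHead, hs]
      · rw [if_neg (by simp [List.isPrefixOf]; exact fun hh => hc hh.symm)]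
        rw [ih _ _ _ (by simp at h ⊢; omega)]
        rcases hs : splitDot rest with _ | ⟨h0, t0⟩
        · exact absurd hs (splitDot_ne_nil rest)
        · simp [splitDot, if_neg hc, hs, consHead]

lemma splitOn_eq_splitDot (cs : List Char) :
    PySem.Chars.splitOn cs ['.'] = splitDot cs := by
  rw [PySem.Chars.splitOn, go_spec _ _ _ _ (by omega)]
  rcases hs : splitDot cs with _ | ⟨h0, t0⟩
  · exact absurd hs (splitDot_ne_nil cs)
  · simp [consHead]

lemma join_cons (p : List Char) (t : List (List Char)) :
    PySem.Chars.join ['.'] (p :: t)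
      = p ++ (if t = [] then [] else '.' :: PySem.Chars.join ['.'] t) := by
  cases t with
  | nil => simp [PySem.Chars.join_singleton]
  | cons q r => simp [PySem.Chars.join_cons_cons]

lemma join_splitDot (cs : List Char) : PySem.Chars.join ['.'] (splitDot cs) = cs := by
  induction cs with
  | nil => simp [splitDot, PySem.Chars.join_singleton]
  | cons c cs ih =>
    rcases hs : splitDot cs with _ | ⟨h0, t0⟩
    · exact absurd hs (splitDot_ne_nil cs)
    · by_cases hc : c = '.'
      · subst hc
        rw [splitDot_dot, join_cons]
        simp [splitDot_ne_nil cs, ih]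
      · rw [splitDot_ndot hc cs h0 t0 hs, join_cons]
        rw [hs, join_cons] at ih
        rw [List.cons_append, ih]

/-- The joins of all suffixes of the split: the domain itself, then B's suffixes in order. -/
lemma joins_eq (cs : List Char) :
    (List.range (splitDot cs).length).map
      (fun i => PySem.Chars.join ['.'] ((splitDot cs).drop i)) = cs :: bSpec cs := by
  induction cs with
  | nil => simp [splitDot, bSpec, PySem.Chars.join_singleton]
  | cons c cs ih =>
    by_cases hc : c = '.'
    · subst hc
      rw [splitDot_dot]
      simp only [List.length_cons, List.range_succ_eq_map, List.map_cons, List.map_map,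
        List.drop_zero, List.cons.injEq]
      refine ⟨?_, ?_⟩
      · rw [join_cons]
        simp [splitDot_ne_nil, join_splitDot]
      · have : (fun i => PySem.Chars.join ['.'] (List.drop i ([] :: splitDot cs))) ∘ Nat.succ
            = fun i => PySem.Chars.join ['.'] (List.drop i (splitDot cs)) := rfl
        rw [this, ih]
        simp [bSpec]
    · rcases hs : splitDot cs with _ | ⟨h0, t0⟩
      · exact absurd hs (splitDot_ne_nil cs)
      rw [splitDot_ndot hc cs h0 t0 hs]
      rw [hs] at ih
      simp only [List.length_cons, List.range_succ_eq_map, List.map_cons, List.map_map,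
        List.drop_zero, List.cons.injEq] at ih ⊢
      obtain ⟨ih1, ih2⟩ := ih
      refine ⟨?_, ?_⟩
      · rw [join_cons]; rw [join_cons] at ih1
        rw [List.cons_append, ih1]
      · have : (fun i => PySem.Chars.join ['.'] (List.drop i ((c :: h0) :: t0))) ∘ Nat.succ
            = (fun i => PySem.Chars.join ['.'] (List.drop i (h0 :: t0))) ∘ Nat.succ := rfl
        rw [this, ih2]
        simp [bSpec, hc]

lemma bSpec_len_lt (cs : List Char) : ∀ x ∈ bSpec cs, x.length < cs.length := by
  induction cs with
  | nil => simp [bSpec]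
  | cons c cs ih =>
    intro x hx
    simp only [bSpec, List.mem_append] at hx
    rcases hx with hx | hx
    · split at hx <;> simp_all
    · have := ih x hx; simp; omega

/-- Prop-condition variant of `PySem.List.foldl_append_if` (decide bridge). -/
lemma foldl_append_if_prop {α β : Type} (p : α → Prop) [DecidablePred p] (f : α → β)
    (l : List α) (acc : List β) :
    List.foldl (fun acc x => if p x then acc ++ [f x] else acc) acc l
      = acc ++ (l.filter (fun x => decide (p x))).map f := by
  rw [← PySem.List.foldl_append_if (fun x => decide (p x)) f l acc]
  simp

lemma filter_map_comm {α β : Type} (p : β → Bool) (f : α → β) (l : List α) :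
    (l.filter (fun x => p (f x))).map f = (l.map f).filter p := by
  induction l with
  | nil => simp
  | cons a l ih => by_cases h : p (f a) <;> simp [h, ih]

/-- B's port, at the character level, computes `bSpec` (generalised over a consumed prefix). -/
lemma benum (cs : List Char) : ∀ (us : List Char),
    ((PySem.List.enumerate cs (us.length : Int)).filter (fun p => p.2 == '.')).map
      (fun p => PySem.List.slice (us ++ cs) (some (p.1 + 1)) none) = bSpec cs := by
  induction cs with
  | nil => intro us; simp [PySem.List.enumerate, bSpec]
  | cons c cs ih =>
    intro us
    rw [PySem.List.enumerate_cons]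
    have hrest : ((us.length : Int) + 1) = (((us ++ [c]).length : Nat) : Int) := by
      simp
    have hfull : us ++ c :: cs = (us ++ [c]) ++ cs := by simp
    by_cases hc : c = '.'
    · subst hc
      rw [List.filter_cons_of_pos (by simp), List.map_cons]
      have hrhs : bSpec ('.' :: cs) = cs :: bSpec cs := by simp [bSpec]
      rw [hrhs]
      refine congrArg₂ List.cons ?_ ?_
      · rw [hrest, hfull, PySem.List.slice_from_natCast, List.drop_left]
      · rw [hrest, hfull]
        exact ih (us ++ ['.'])
    · rw [List.filter_cons_of_neg (by simp [hc])]
      have hrhs : bSpec (c :: cs) = bSpec cs := by simp [bSpec, hc]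
      rw [hrhs, hrest, hfull]
      exact ih (us ++ [c])

lemma bcore_eq (cs : List Char) :
    ((PySem.List.enumerate cs 0).filter (fun p => p.2 == '.')).map
      (fun p => PySem.List.slice cs (some (p.1 + 1)) none) = bSpec cs := by
  have := benum cs []
  simpa using this

/-- A's loop, at the character level, also computes `bSpec`. -/
lemma acore_eq (cs : List Char) (hne : cs ≠ []) :
    (PySem.List.pyRange 0 ((splitDot cs).length : Int) 1).foldl
      (fun parents i =>
        let parent := PySem.Chars.join ['.'] (PySem.List.slice (splitDot cs) (some i) none)
        if parent ≠ cs then parents ++ [parent] else parents) [] = bSpec cs := by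
  rw [PySem.List.pyRange_zero_nat, List.foldl_map]
  have hbody : (fun (parents : List (List Char)) (k : ℕ) =>
      (fun parents (i : Int) =>
        let parent := PySem.Chars.join ['.'] (PySem.List.slice (splitDot cs) (some i) none)
        if parent ≠ cs then parents ++ [parent] else parents) parents ((k : Nat) : Int))
      = fun parents k =>
        if PySem.Chars.join ['.'] (PySem.List.slice (splitDot cs) (some ((k : Nat) : Int)) none) ≠ cs
        then parents ++ [PySem.Chars.join ['.'] (PySem.List.slice (splitDot cs) (some ((k : Nat) : Int)) none)]
        else parents := rfl
  rw [hbody]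
  rw [foldl_append_if_prop
    (fun k : ℕ => PySem.Chars.join ['.'] (PySem.List.slice (splitDot cs) (some ((k : Nat) : Int)) none) ≠ cs)
    (fun k : ℕ => PySem.Chars.join ['.'] (PySem.List.slice (splitDot cs) (some ((k : Nat) : Int)) none))
    (List.range (splitDot cs).length) []]
  rw [List.nil_append]
  have hJ : ∀ k : ℕ, PySem.Chars.join ['.'] (PySem.List.slice (splitDot cs) (some ((k : Nat) : Int)) none)
      = PySem.Chars.join ['.'] ((splitDot cs).drop k) := by
    intro k; rw [PySem.List.slice_from_natCast]
  simp only [hJ]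
  rw [filter_map_comm (fun x => decide (x ≠ cs))
    (fun k => PySem.Chars.join ['.'] ((splitDot cs).drop k)) (List.range (splitDot cs).length)]
  rw [joins_eq]
  rw [List.filter_cons_of_neg (by simp)]
  apply List.filter_eq_self.mpr
  intro x hx
  have := bSpec_len_lt cs x hx
  simp only [decide_eq_true_eq]
  intro h; subst h; omega

-- ===== VERDICT (by name: the statement is the Claim_ definition above) =====
theorem get_parent_domains_spec : Claim_equal_get_parent_domains := by
  unfold Claim_equal_get_parent_domains
  intro domain _
  unfold Spec_get_parent_domains get_parent_domains get_parent_domains_alt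
  have halt : ((PySem.List.enumerate domain.toList 0).filter (fun p => p.2 == '.')).map
      (fun p => String.ofList (PySem.List.slice domain.toList (some (p.1 + 1)) none))
      = (bSpec domain.toList).map String.ofList := by
    rw [← bcore_eq domain.toList, List.map_map]
    rfl
  rw [halt]
  by_cases hz : PySem.Str.len domain = 0
  · rw [if_pos hz]
    have : domain.toList = [] := by
      simpa [PySem.Str.len_eq] using hz
    simp [this, bSpec]
  · rw [if_neg hz]
    have hne : domain.toList ≠ [] := by
      intro h
      exact hz (by simp [PySem.Str.len_eq, h])
    rw [splitOn_eq_splitDot]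
    exact congrArg (List.map String.ofList) (acore_eq domain.toList hne)
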